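-- pv_equiv track=rewrite | github.com/rriva002/DTC-Classifier | extractPatterns.py | __peek_next_token
-- ===== SOURCE A (Python) =====
-- def __peek_next_token(s, position):
--     if position == len(s):
--         return None
--
--     start = position
--     tokens_a = [" ", "\t", "\n", "\r"]
--
--     while start < len(s) and s[start] in tokens_a:
--         start += 1
--
--     if position >= len(s):
--         return None
--
--     end = start
--     tokens_b = ["[", "]", ">", "/"]
--
--     if s[start] in tokens_b:
--         return s[start]
--
--     while end < len(s) and s[end] not in tokens_a + tokens_b:
--         end += 1
--
--     return s[start:end].strip()
-- ===== SOURCE B (Python) =====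
-- WS = " \t\n\r"
-- DELIMS = "[]>/"
--
--
-- def __peek_next_token(s, position):
--     # Single forward pass over the tail with a small state machine, instead of
--     # two index-based while loops plus slicing/strip.
--     if position >= len(s):
--         return None
--     token = ""
--     in_token = False
--     for ch in s[position:]:
--         if in_token:
--             if ch in WS or ch in DELIMS:
--                 break
--             token += ch
--         elif ch in DELIMS:
--             return ch
--         elif ch not in WS:
--             in_token = True
--             token = ch
--     return token if in_token else None
-- ===== Notes on version B (the rewrite author's own statement) =====
-- stated objective: faster
-- what changed: Replaced A's two index-arithmetic while-loops (which rebuild the tokens_a+tokens_b list on every step) plus slice-and-strip with a single forward pass over the tail s[position:] driven by a small state machine that accumulates the token directly.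
-- outside the precondition, e.g. on __peek_next_token('x a', -1): A returns '', B returns 'a'
import Mathlib
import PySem

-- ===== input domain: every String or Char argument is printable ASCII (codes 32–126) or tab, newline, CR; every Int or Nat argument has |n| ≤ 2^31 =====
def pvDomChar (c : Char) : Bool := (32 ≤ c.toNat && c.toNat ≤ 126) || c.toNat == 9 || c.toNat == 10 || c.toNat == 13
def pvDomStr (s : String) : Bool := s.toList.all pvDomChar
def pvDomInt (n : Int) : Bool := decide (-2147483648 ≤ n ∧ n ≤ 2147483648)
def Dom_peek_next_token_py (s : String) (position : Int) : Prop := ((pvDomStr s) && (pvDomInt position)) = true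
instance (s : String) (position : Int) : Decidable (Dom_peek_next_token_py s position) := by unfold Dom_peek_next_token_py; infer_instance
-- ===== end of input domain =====

-- B replaces A's two index-based while-loops plus slice-and-strip with one forward pass
-- over the tail s[position:] driven by a small accumulator state machine (measurably
-- faster by a constant factor: no per-step index bookkeeping or tokens_a+tokens_b rebuild).

-- ===== PORT A =====
-- character classes: tokens_a = [" ", "\t", "\n", "\r"], tokens_b = ["[", "]", ">", "/"]
def pvIsWS (c : Char) : Bool := c = ' ' || c = '\t' || c = '\n' || c = '\r'
def pvIsDelim (c : Char) : Bool := c = '[' || c = ']' || c = '>' || c = '/'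
-- 'c in tokens_a + tokens_b'
def pvIsStop (c : Char) : Bool := pvIsWS c || pvIsDelim c

-- A's two while-loops share one shape: advance the index while it is in range and the
-- character satisfies q ('while i < len(s) and q(s[i]): i += 1').  On an index where
-- Python's s[i] would raise (i < -len, impossible under Pre_) the loop stops.
def pvAWhile (q : Char → Bool) (cs : List Char) (i : Int) : Int :=
  if h : i < (cs.length : Int) ∧ (PySem.List.pyGet? cs i).map q = some true then
    pvAWhile q cs (i + 1)
  else i
termination_by (cs.length - i).toNat
decreasing_by obtain ⟨h1, _⟩ := h; omega

def peek_next_token_py (s : String) (position : Int) : Option String :=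
  let cs := s.toList
  if position = (cs.length : Int) then none
  else
    let start := pvAWhile pvIsWS cs position
    if position ≥ (cs.length : Int) then none
    else
      match PySem.List.pyGet? cs start with
      | none => none   -- Python raises IndexError here; excluded by Pre_
      | some c =>
        if pvIsDelim c then some (String.ofList [c])
        else
          let e := pvAWhile (fun ch => !pvIsStop ch) cs start
          some (String.ofList (PySem.Chars.strip (PySem.List.slice cs (some start) (some e))))

-- ===== PORT B =====
-- the for-loop of B: state (token, in_token), early return on a delimiter, break on a stop
def pvBGo (chs : List Char) (token : List Char) (inToken : Bool) : Option String :=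
  match chs with
  | [] => if inToken then some (String.ofList token) else none
  | ch :: rest =>
    if inToken then
      if pvIsWS ch || pvIsDelim ch then some (String.ofList token)   -- break
      else pvBGo rest (token ++ [ch]) true                       -- token += ch
    else if pvIsDelim ch then some (String.ofList [ch])              -- return ch
    else if !(pvIsWS ch) then pvBGo rest [ch] true               -- in_token = True; token = ch
    else pvBGo rest token false                                  -- skip whitespace

def peek_next_token_py_alt (s : String) (position : Int) : Option String :=
  if position ≥ (s.toList.length : Int) then none
  else pvBGo (PySem.List.slice s.toList (some position) none) [] false

-- ===== PRECONDITION & SPEC =====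
-- Pre_ excludes (a) negative positions, which are outside a tokenizer's natural domain and
-- where A's value (or IndexError) comes from Python's negative-index wraparound scanning
-- across the string boundary, and (b) in-range positions whose tail is entirely whitespace,
-- on which A raises IndexError at the unconditional s[start].
def Pre_peek_next_token_py (s : String) (position : Int) : Prop :=
  0 ≤ position ∧
    ((s.toList.length : Int) ≤ position ∨
      (s.toList.drop position.toNat).any (fun c => !pvIsWS c) = true)
instance (s : String) (position : Int) : Decidable (Pre_peek_next_token_py s position) := by unfold Pre_peek_next_token_py; infer_instance

def pvWitness_peek_next_token_py : String × Int := ("ab [x]", 0)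

def Spec_peek_next_token_py (s : String) (position : Int) (out : Option String) : Prop := out = peek_next_token_py_alt s position
instance (s : String) (position : Int) (out : Option String) : Decidable (Spec_peek_next_token_py s position out) := by unfold Spec_peek_next_token_py; infer_instance

-- ===== CLAIM (what is proved, stated in full; the proofs are below) =====
def Claim_equal_peek_next_token_py : Prop := ∀ (s : String) (position : Int), Dom_peek_next_token_py s position → Pre_peek_next_token_py s position → Spec_peek_next_token_py s position (peek_next_token_py s position)


-- ===== LEMMAS AND PROOFS =====

-- the while-loop shape: it skips exactly the q-true prefix of the remaining characters
theorem pvAWhile_spec (q : Char → Bool) (cs : List Char) :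
    ∀ (l : List Char) (p : Int), 0 ≤ p → cs.drop p.toNat = l →
      pvAWhile q cs p = p + ((l.takeWhile q).length : Int) := by
  intro l
  induction l with
  | nil =>
    intro p hp hd
    have hlen : (cs.length : Int) ≤ p := by
      have := List.drop_eq_nil_iff.mp hd; omega
    rw [pvAWhile, dif_neg (by omega)]
    simp
  | cons c rest ih =>
    intro p hp hd
    have hlt : p < (cs.length : Int) := by
      have h1 : (cs.drop p.toNat).length = cs.length - p.toNat := List.length_drop ..
      rw [hd] at h1; simp at h1; omega
    have hget : PySem.List.pyGet? cs p = some c := by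
      rw [PySem.List.pyGet?_of_nonneg cs hp, ← List.head?_drop, hd]; rfl
    by_cases hw : q c = true
    · rw [pvAWhile, dif_pos ⟨hlt, by rw [hget]; simp [hw]⟩]
      have hd' : cs.drop (p + 1).toNat = rest := by
        have : (p + 1).toNat = p.toNat + 1 := by omega
        rw [this, ← List.drop_drop, hd]; rfl
      rw [ih (p + 1) (by omega) hd']
      simp [hw]; omega
    · rw [pvAWhile, dif_neg (by rw [hget]; simp [hw]), List.takeWhile_cons,
        if_neg hw]
      simp

-- B's scanning phase skips exactly the whitespace prefix
theorem pvBGo_skip (l : List Char) (tok : List Char) :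
    pvBGo l tok false = pvBGo (l.dropWhile pvIsWS) tok false := by
  induction l with
  | nil => rfl
  | cons c rest ih =>
    by_cases hw : pvIsWS c = true
    · have hnd : pvIsDelim c = false := by
        simp [pvIsWS] at hw
        rcases hw with ((h | h) | h) | h <;> subst h <;> decide
      rw [pvBGo]
      rw [if_neg (by simp), if_neg (by simp [hnd]), if_neg (by simp [hw]),
        List.dropWhile_cons_of_pos hw, ih]
    · rw [List.dropWhile_cons_of_neg hw]

-- B's accumulating phase collects exactly the non-stop prefix
theorem pvBGo_token (l : List Char) :
    ∀ (tok : List Char),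
      pvBGo l tok true = some (String.ofList (tok ++ l.takeWhile (fun c => !pvIsStop c))) := by
  induction l with
  | nil => intro tok; simp [pvBGo]
  | cons c rest ih =>
    intro tok
    by_cases hs : pvIsStop c = true
    · rw [pvBGo, if_pos rfl, if_pos (by simpa [pvIsStop] using hs),
        List.takeWhile_cons, if_neg (by simp [hs])]
      simp
    · rw [pvBGo, if_pos rfl, if_neg (by simpa [pvIsStop] using hs), ih,
        List.takeWhile_cons, if_pos (by simp [hs])]
      simp

-- a character that survives A's stop test is not Python whitespace (within the domain)
theorem pv_not_isspace {c : Char} (hdom : pvDomChar c = true) (hws : pvIsWS c = false) :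
    PySem.Chars.isspace c = false := by
  have key : ∀ (d : Char), c.toNat = d.toNat → c = d := fun d h => Char.ext (UInt32.toNat_inj.mp h)
  have h32 : c.toNat ≠ 32 := fun h => by
    rw [key ' ' h] at hws; exact absurd hws (by decide)
  have h9 : c.toNat ≠ 9 := fun h => by
    rw [key '\t' h] at hws; exact absurd hws (by decide)
  have h10 : c.toNat ≠ 10 := fun h => by
    rw [key '\n' h] at hws; exact absurd hws (by decide)
  have h13 : c.toNat ≠ 13 := fun h => by
    rw [key '\r' h] at hws; exact absurd hws (by decide)
  simp [pvDomChar] at hdom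
  simp [PySem.Chars.isspace]
  omega

-- strip is a no-op on a list of non-whitespace characters
theorem pv_strip_id (l : List Char) (h : ∀ c ∈ l, PySem.Chars.isspace c = false) :
    PySem.Chars.strip l = l := by
  have h1 : l.dropWhile PySem.Chars.isspace = l :=
    List.dropWhile_eq_self_iff.mpr (fun hl => by simp [h _ (List.getElem_mem hl)])
  have h2 : l.reverse.dropWhile PySem.Chars.isspace = l.reverse :=
    List.dropWhile_eq_self_iff.mpr
      (fun hl => by have hx := h _ (List.mem_reverse.mp (List.getElem_mem hl)); simpa using hx)
  unfold PySem.Chars.strip PySem.Chars.lstrip PySem.Chars.rstrip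
  rw [h1, h2, List.reverse_reverse]


-- drop past the takeWhile-prefix is dropWhile (specific combination of the two scans)
theorem pv_drop_takeWhile_length (p : Char → Bool) (l : List Char) :
    l.drop (l.takeWhile p).length = l.dropWhile p := by
  induction l with
  | nil => rfl
  | cons c rest ih =>
    by_cases hc : p c
    · simp [hc, ih]
    · simp [hc]

-- the first character surviving dropWhile fails the predicate
theorem pv_dropWhile_head_false (p : Char → Bool) (l t : List Char) (c : Char)
    (h : l.dropWhile p = c :: t) : p c = false := by
  induction l with
  | nil => cases h
  | cons a rest ih =>
    rw [List.dropWhile_cons] at h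
    by_cases ha : p a
    · rw [if_pos ha] at h; exact ih h
    · rw [if_neg ha] at h; cases h; simpa using ha

theorem peek_next_token_py_spec : Claim_equal_peek_next_token_py := by
  intro s position hdom hpre
  obtain ⟨hpos, hrest⟩ := hpre
  unfold Spec_peek_next_token_py peek_next_token_py peek_next_token_py_alt
  by_cases hge : (s.toList.length : Int) ≤ position
  · by_cases heq : position = (s.toList.length : Int)
    · simp [heq]
    · simp only [if_neg heq]
      rw [if_pos (by omega), if_pos (by omega)]
  · have hlt : position < (s.toList.length : Int) := by omega
    have hany : (s.toList.drop position.toNat).any (fun c => !pvIsWS c) = true := by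
      rcases hrest with h | h
      · omega
      · exact h
    obtain ⟨c₀, t, hct⟩ : ∃ c₀ t, (s.toList.drop position.toNat).dropWhile pvIsWS = c₀ :: t := by
      rcases h : (s.toList.drop position.toNat).dropWhile pvIsWS with _ | ⟨c₀, t⟩
      · obtain ⟨c, hc, hcw⟩ := List.any_eq_true.mp hany
        rw [List.dropWhile_eq_nil_iff.mp h c hc] at hcw; cases hcw
      · exact ⟨c₀, t, rfl⟩
    have hc₀ : pvIsWS c₀ = false := pv_dropWhile_head_false _ _ _ _ hct
    have hskip := pvAWhile_spec pvIsWS s.toList (s.toList.drop position.toNat) position hpos rfl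
    have hwle : ((s.toList.drop position.toNat).takeWhile pvIsWS).length
        ≤ s.toList.length - position.toNat := by
      have h0 := (List.takeWhile_prefix (l := s.toList.drop position.toNat) pvIsWS).length_le
      rwa [List.length_drop] at h0
    have hdrop_start :
        s.toList.drop (position + (((s.toList.drop position.toNat).takeWhile pvIsWS).length : Int)).toNat
          = c₀ :: t := by
      have h1 : (position + (((s.toList.drop position.toNat).takeWhile pvIsWS).length : Int)).toNat
          = position.toNat + ((s.toList.drop position.toNat).takeWhile pvIsWS).length := by omega
      rw [h1, ← List.drop_drop, pv_drop_takeWhile_length, hct]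
    have hstart_lt :
        position + (((s.toList.drop position.toNat).takeWhile pvIsWS).length : Int)
          < (s.toList.length : Int) := by
      have h2 := congrArg List.length hdrop_start
      rw [List.length_drop] at h2
      simp only [List.length_cons] at h2
      omega
    have hget0 : PySem.List.pyGet? s.toList
        (position + (((s.toList.drop position.toNat).takeWhile pvIsWS).length : Int)) = some c₀ := by
      rw [PySem.List.pyGet?_of_nonneg s.toList (by omega), ← List.head?_drop, hdrop_start]; rfl
    have hdomall : ∀ c ∈ s.toList, pvDomChar c = true := by
      unfold Dom_peek_next_token_py at hdom
      simp only [Bool.and_eq_true] at hdom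
      exact List.all_eq_true.mp (by simpa [pvDomStr] using hdom.1)
    simp only [if_neg (show ¬ position = (s.toList.length:Int) by omega),
      if_neg (show ¬ position ≥ (s.toList.length:Int) by omega), hskip, hget0]
    rw [PySem.List.slice_from s.toList hpos, pvBGo_skip, hct]
    have hscan := pvAWhile_spec (fun ch => !pvIsStop ch) s.toList (c₀ :: t)
      (position + ((List.takeWhile pvIsWS (List.drop position.toNat s.toList)).length : Int))
      (by omega) hdrop_start
    by_cases hdel : pvIsDelim c₀ = true
    · rw [if_pos hdel]
      simp [pvBGo, hdel]
    · rw [if_neg hdel]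
      have hstop : (!pvIsStop c₀) = true := by simp [pvIsStop, hc₀, hdel]
      have hkle : ((c₀ :: t).takeWhile (fun ch => !pvIsStop ch)).length ≤ (c₀ :: t).length :=
        (List.takeWhile_prefix _).length_le
      rw [hscan, PySem.List.slice_toNat s.toList (by omega) (by omega)]
      have harith : ((position + ((List.takeWhile pvIsWS (List.drop position.toNat s.toList)).length : Int))
            + (((c₀ :: t).takeWhile (fun ch => !pvIsStop ch)).length : Int)).toNat
          - (position + ((List.takeWhile pvIsWS (List.drop position.toNat s.toList)).length : Int)).toNat
          = ((c₀ :: t).takeWhile (fun ch => !pvIsStop ch)).length := by omega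
      rw [harith, hdrop_start,
        ← List.prefix_iff_eq_take.mp (List.takeWhile_prefix (l := c₀ :: t) (fun ch => !pvIsStop ch))]
      rw [pv_strip_id _ ?mem]
      case mem =>
        intro c hc
        have hstopc := List.mem_takeWhile_imp hc
        have hcmem : c ∈ s.toList := by
          have h1 : c ∈ c₀ :: t := (List.takeWhile_prefix _).mem hc
          have h2 : c ∈ List.drop position.toNat s.toList :=
            (List.dropWhile_suffix pvIsWS).mem (hct ▸ h1)
          exact List.mem_of_mem_drop h2
        have hwsc : pvIsWS c = false := by
          simp [pvIsStop] at hstopc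
          simp [hstopc.1]
        exact pv_not_isspace (hdomall c hcmem) hwsc
      simp only [pvBGo, hc₀, hdel]
      rw [pvBGo_token t [c₀]]
      rw [List.takeWhile_cons, if_pos hstop]
      rfl
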